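-- pv_equiv track=rewrite | github.com/IlyaOdud/parallel_calculation | Task_4_block_alg/host_sim.py | Matrix_slicer
-- ===== SOURCE A (Python) =====
-- def Matrix_slicer(Base_Matrix, n_in_thr):
--     N_row, N_col = len(Base_Matrix), len(Base_Matrix[0])
--     n_of_row_matrix = int(N_row // n_in_thr) if N_row % n_in_thr == 0 else int(N_row // n_in_thr) + 1
--     n_of_col_matrix = int(N_col // n_in_thr) if N_col % n_in_thr == 0 else int(N_col // n_in_thr) + 1
--     Sliced_Matrix = []
--     for i_row in range(n_of_row_matrix):
--         for i_col in range(n_of_col_matrix):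
--             Matrix_part = [[0 for i in range(n_in_thr)] for j in range(n_in_thr)]
--             for i in range(n_in_thr):
--                 for j in range(n_in_thr):
--                     i_for_base, j_for_base = i_row*n_in_thr + i, i_col*n_in_thr + j
--                     if i_for_base < N_row :
--                         if j_for_base < N_col :
--                             Matrix_part[i][j] = Base_Matrix[i_for_base][j_for_base]
--                         else:
--                             break
--                     else:
--                         break
--             Sliced_Matrix += [Matrix_part]
--     return Sliced_Matrix, n_of_row_matrix, n_of_col_matrix
-- ===== SOURCE B (Python) =====
-- def Matrix_slicer(Base_Matrix, n_in_thr):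
--     N_row, N_col = len(Base_Matrix), len(Base_Matrix[0])
--     n_of_row_matrix = -(-N_row // n_in_thr)
--     n_of_col_matrix = -(-N_col // n_in_thr)
--     blocks = [[[0] * n_in_thr for _ in range(n_in_thr)]
--               for _ in range(n_of_row_matrix * n_of_col_matrix)]
--     for i in range(N_row):
--         qi, ri = divmod(i, n_in_thr)
--         row = Base_Matrix[i]
--         for j in range(N_col):
--             qj, rj = divmod(j, n_in_thr)
--             blocks[qi * n_of_col_matrix + qj][ri][rj] = row[j]
--     return blocks, n_of_row_matrix, n_of_col_matrix
-- ===== Notes on version B (the rewrite author's own statement) =====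
-- stated objective: alternative
-- what changed: A gathers block by block with a quadruple nested loop (zero grid per block, per-element bounds tests with breaks); B pre-allocates all zero blocks flat and does one scatter pass over the source elements, computing each element's block and offset by divmod.
-- outside the precondition, e.g. on Matrix_slicer([[1]], -1): A returns ([], -1, -1), B raises IndexError
import Mathlib
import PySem

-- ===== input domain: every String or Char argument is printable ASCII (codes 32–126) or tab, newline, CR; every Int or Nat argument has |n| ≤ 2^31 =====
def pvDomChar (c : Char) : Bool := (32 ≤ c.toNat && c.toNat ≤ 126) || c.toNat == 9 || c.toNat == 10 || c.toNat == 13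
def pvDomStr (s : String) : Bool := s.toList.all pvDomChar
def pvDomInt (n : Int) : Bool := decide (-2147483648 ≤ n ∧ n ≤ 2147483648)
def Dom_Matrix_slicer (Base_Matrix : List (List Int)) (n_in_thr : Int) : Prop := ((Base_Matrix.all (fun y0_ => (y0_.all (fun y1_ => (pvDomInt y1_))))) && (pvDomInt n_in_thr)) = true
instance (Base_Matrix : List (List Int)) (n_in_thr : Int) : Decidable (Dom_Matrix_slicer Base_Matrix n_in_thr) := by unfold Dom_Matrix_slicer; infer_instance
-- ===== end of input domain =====

-- B re-implements the gather-per-block quadruple loop of A as a single scatter pass over the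
-- source elements into pre-allocated zero blocks; equal return values on Pre_ (neither mutates its input).

-- ===== PORT A =====
-- inner `for j in range(n_in_thr)` loop of A, with its two `break`s (early return of the j-loop)
def pvAJ (B : List (List Int)) (Nrow Ncol ir ic n i : Int) : List Int → List (List Int) → List (List Int)
  | [], part => part
  | j :: js, part =>
    let ib := ir * n + i
    let jb := ic * n + j
    if ib < Nrow then
      if jb < Ncol then
        pvAJ B Nrow Ncol ir ic n i js
          (part.modify i.toNat (fun row =>
            row.modify j.toNat (fun _ => PySem.List.pyGetD (PySem.List.pyGetD B ib []) jb 0)))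
      else part
    else part

-- one Matrix_part: zero grid, then the `for i` / `for j` fill loops
def pvAPart (B : List (List Int)) (Nrow Ncol n ir ic : Int) : List (List Int) :=
  let part0 := (PySem.List.pyRange 0 n 1).map (fun _ => (PySem.List.pyRange 0 n 1).map (fun _ => (0 : Int)))
  (PySem.List.pyRange 0 n 1).foldl
    (fun part i => pvAJ B Nrow Ncol ir ic n i (PySem.List.pyRange 0 n 1) part) part0

def Matrix_slicer (Base_Matrix : List (List Int)) (n_in_thr : Int) : List (List (List Int)) × Int × Int :=
  let Nrow : Int := Base_Matrix.length
  let Ncol : Int := (PySem.List.pyGetD Base_Matrix 0 []).length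
  let nr : Int := if PySem.Int.mod Nrow n_in_thr = 0 then PySem.Int.floordiv Nrow n_in_thr
                  else PySem.Int.floordiv Nrow n_in_thr + 1
  let nc : Int := if PySem.Int.mod Ncol n_in_thr = 0 then PySem.Int.floordiv Ncol n_in_thr
                  else PySem.Int.floordiv Ncol n_in_thr + 1
  let sliced := (PySem.List.pyRange 0 nr 1).foldl
    (fun acc ir => (PySem.List.pyRange 0 nc 1).foldl
      (fun acc ic => acc ++ [pvAPart Base_Matrix Nrow Ncol n_in_thr ir ic]) acc) []
  (sliced, nr, nc)

-- ===== PORT B =====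
def Matrix_slicer_alt (Base_Matrix : List (List Int)) (n_in_thr : Int) : List (List (List Int)) × Int × Int :=
  let Nrow : Int := Base_Matrix.length
  let Ncol : Int := (PySem.List.pyGetD Base_Matrix 0 []).length
  let nr : Int := -(PySem.Int.floordiv (-Nrow) n_in_thr)
  let nc : Int := -(PySem.Int.floordiv (-Ncol) n_in_thr)
  let blocks0 := (PySem.List.pyRange 0 (nr * nc) 1).map
    (fun _ => (PySem.List.pyRange 0 n_in_thr 1).map (fun _ => List.replicate n_in_thr.toNat (0 : Int)))
  let blocks := (PySem.List.pyRange 0 Nrow 1).foldl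
    (fun bl i =>
      let qi := PySem.Int.floordiv i n_in_thr
      let ri := PySem.Int.mod i n_in_thr
      let row := PySem.List.pyGetD Base_Matrix i []
      (PySem.List.pyRange 0 Ncol 1).foldl
        (fun bl j =>
          let qj := PySem.Int.floordiv j n_in_thr
          let rj := PySem.Int.mod j n_in_thr
          bl.modify (qi * nc + qj).toNat
            (fun blk => blk.modify ri.toNat
              (fun r => r.modify rj.toNat (fun _ => PySem.List.pyGetD row j 0)))) bl) blocks0
  (blocks, nr, nc)

-- ===== PRECONDITION & SPEC =====
-- Pre_ excludes: the empty matrix and rows shorter than the first row (A raises IndexError there),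
-- n_in_thr = 0 (A raises ZeroDivisionError), and negative n_in_thr — a block size outside the task's
-- natural domain, on which A happens to return ([], negative, negative) while B raises IndexError.
def Pre_Matrix_slicer (Base_Matrix : List (List Int)) (n_in_thr : Int) : Prop :=
  1 ≤ n_in_thr ∧ Base_Matrix ≠ [] ∧
    ∀ row ∈ Base_Matrix, (Base_Matrix.headI).length ≤ row.length
instance (Base_Matrix : List (List Int)) (n_in_thr : Int) : Decidable (Pre_Matrix_slicer Base_Matrix n_in_thr) := by unfold Pre_Matrix_slicer; infer_instance
def pvWitness_Matrix_slicer : List (List Int) × Int := ([[1, 2, 3], [4, 5, 6]], 2)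

def Spec_Matrix_slicer (Base_Matrix : List (List Int)) (n_in_thr : Int) (out : List (List (List Int)) × Int × Int) : Prop := out = Matrix_slicer_alt Base_Matrix n_in_thr
instance (Base_Matrix : List (List Int)) (n_in_thr : Int) (out : List (List (List Int)) × Int × Int) : Decidable (Spec_Matrix_slicer Base_Matrix n_in_thr out) := by unfold Spec_Matrix_slicer; infer_instance

-- ===== CLAIM (what is proved, stated in full; the proofs are below) =====
def Claim_equal_Matrix_slicer : Prop := ∀ (Base_Matrix : List (List Int)) (n_in_thr : Int), Dom_Matrix_slicer Base_Matrix n_in_thr → Pre_Matrix_slicer Base_Matrix n_in_thr → Spec_Matrix_slicer Base_Matrix n_in_thr (Matrix_slicer Base_Matrix n_in_thr)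

-- ===== LEMMAS AND PROOFS =====

def pvCeil (a N : Nat) : Nat := if a % N = 0 then a / N else a / N + 1

lemma pvCeil_bracket {a N : Nat} (hN : 0 < N) :
    a ≤ pvCeil a N * N ∧ pvCeil a N * N < a + N := by
  unfold pvCeil
  have h := Nat.div_add_mod a N
  have hm := Nat.mod_lt a hN
  have hmul : (a / N + 1) * N = N * (a / N) + N := by ring
  rcases Nat.eq_zero_or_pos (a % N) with h0 | h0
  · rw [if_pos h0]
    have h2 : a / N * N = N * (a / N) := by ring
    rw [h2]
    omega
  · rw [if_neg (by omega), hmul]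
    omega

lemma pv_nrA (a N : Nat) (hN : 0 < N) :
    (if PySem.Int.mod (a : Int) (N : Int) = 0 then PySem.Int.floordiv (a : Int) (N : Int)
     else PySem.Int.floordiv (a : Int) (N : Int) + 1) = (pvCeil a N : Int) := by
  unfold pvCeil
  rw [PySem.Int.mod_natCast, PySem.Int.floordiv_natCast]
  by_cases h : a % N = 0
  · rw [if_pos h, if_pos (by exact_mod_cast congrArg (Nat.cast : Nat → Int) h)]
  · rw [if_neg h, if_neg (by exact_mod_cast h), Nat.cast_add, Nat.cast_one]

lemma pv_nrB (a N : Nat) (hN : 0 < N) :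
    -(PySem.Int.floordiv (-(a : Int)) (N : Int)) = (pvCeil a N : Int) := by
  have hbr := pvCeil_bracket (a := a) hN
  rw [PySem.Int.neg_floordiv_neg_eq_iff_of_pos (by exact_mod_cast hN)]
  have hcast : ((pvCeil a N : Int)) * (N : Int) = ((pvCeil a N * N : Nat) : Int) := by push_cast; ring
  constructor
  · rw [sub_mul, one_mul, hcast]
    omega
  · rw [hcast]
    omega

def pvEnt (B : List (List Int)) (C r c : Nat) : Int :=
  if r < B.length ∧ c < C then (B.getD r []).getD c 0 else 0


lemma pv_modify_map_range {α : Type} (g : Nat → α) (f : α → α) {M k : Nat} (hk : k < M) :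
    ((List.range M).map g).modify k f
      = (List.range M).map (fun m => if m = k then f (g k) else g m) := by
  apply List.ext_getElem
  · simp
  · intro i h1 h2
    simp only [List.getElem_modify, List.getElem_map, List.getElem_range] at *
    by_cases h : k = i <;> simp [h] <;> omega


lemma pvAJ_eq (B : List (List Int)) (C N irN icN iN : Nat) (hiN : iN < N) (Q : Nat → List Int) :
    ∀ m k, k + m ≤ N →
    pvAJ B (B.length : Int) (C : Int) (irN : Int) (icN : Int) (N : Int) (iN : Int)
        ((List.range' k m).map (Nat.cast))
        ((List.range N).map (fun i' => if i' = iN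
          then (List.range N).map (fun j => if j < k then pvEnt B C (irN * N + iN) (icN * N + j) else 0)
          else Q i'))
      = (List.range N).map (fun i' => if i' = iN
          then (List.range N).map (fun j => if j < k + m then pvEnt B C (irN * N + iN) (icN * N + j) else 0)
          else Q i') := by
  intro m
  induction m with
  | zero => intro k hk; simp [pvAJ]
  | succ m ih =>
    intro k hk
    rw [List.range'_succ, List.map_cons]
    rw [pvAJ]
    have hcast_ib : (irN : Int) * (N : Int) + (iN : Int) = ((irN * N + iN : Nat) : Int) := by push_cast; ring
    have hcast_jb : (icN : Int) * (N : Int) + (k : Int) = ((icN * N + k : Nat) : Int) := by push_cast; ring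
    simp only [hcast_ib, hcast_jb]
    by_cases h1 : irN * N + iN < B.length
    · rw [if_pos (by exact_mod_cast h1)]
      by_cases h2 : icN * N + k < C
      · rw [if_pos (by exact_mod_cast h2)]
        rw [show ((iN : Int)).toNat = iN from Int.toNat_natCast iN,
            show ((k : Int)).toNat = k from Int.toNat_natCast k]
        rw [pv_modify_map_range _ _ hiN]
        have hrow : ((List.range N).map (fun j => if j < k then pvEnt B C (irN * N + iN) (icN * N + j) else 0)).modify k
              (fun _ => PySem.List.pyGetD (PySem.List.pyGetD B ((irN * N + iN : Nat) : Int) [])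
                ((icN * N + k : Nat) : Int) 0)
            = (List.range N).map (fun j => if j < k + 1 then pvEnt B C (irN * N + iN) (icN * N + j) else 0) := by
          rw [pv_modify_map_range _ _ (by omega : k < N)]
          apply List.map_congr_left
          intro j hj
          simp only [PySem.List.pyGetD_natCast]
          by_cases hjk : j = k
          · subst hjk
            rw [if_pos rfl, if_pos (by omega), pvEnt, if_pos ⟨h1, h2⟩]
          · rw [if_neg hjk]
            by_cases hlt : j < k
            · rw [if_pos hlt, if_pos (by omega)]
            · rw [if_neg hlt, if_neg (by omega)]
        have hgrid : (List.range N).map (fun m' => if m' = iN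
              then ((if iN = iN then (List.range N).map (fun j => if j < k then pvEnt B C (irN * N + iN) (icN * N + j) else 0) else Q iN).modify k
                (fun _ => PySem.List.pyGetD (PySem.List.pyGetD B ((irN * N + iN : Nat) : Int) [])
                  ((icN * N + k : Nat) : Int) 0))
              else if m' = iN then (List.range N).map (fun j => if j < k then pvEnt B C (irN * N + iN) (icN * N + j) else 0) else Q m')
            = (List.range N).map (fun i' => if i' = iN
              then (List.range N).map (fun j => if j < k + 1 then pvEnt B C (irN * N + iN) (icN * N + j) else 0)
              else Q i') := by
          apply List.map_congr_left
          intro m' _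
          by_cases hm : m' = iN
          · rw [if_pos hm, if_pos hm]
            simp only [reduceIte]
            exact hrow
          · rw [if_neg hm, if_neg hm, if_neg hm]
        rw [hgrid, ih (k+1) (by omega)]
        congr 1
        funext i'
        by_cases hm : i' = iN
        · rw [if_pos hm, if_pos hm]
          congr 1
          funext j
          congr 2
          omega
        · rw [if_neg hm, if_neg hm]
      · rw [if_neg (by exact_mod_cast h2)]
        apply List.map_congr_left
        intro i' _
        by_cases hm : i' = iN
        · rw [if_pos hm, if_pos hm]
          apply List.map_congr_left
          intro j _
          by_cases hlt : j < k
          · rw [if_pos hlt, if_pos (by omega)]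
          · rw [if_neg hlt]
            by_cases hlt2 : j < k + (m+1)
            · rw [if_pos hlt2, pvEnt, if_neg (by omega)]
            · rw [if_neg hlt2]
        · rw [if_neg hm, if_neg hm]
    · rw [if_neg (by exact_mod_cast h1)]
      apply List.map_congr_left
      intro i' _
      by_cases hm : i' = iN
      · rw [if_pos hm, if_pos hm]
        apply List.map_congr_left
        intro j _
        have hz : pvEnt B C (irN * N + iN) (icN * N + j) = 0 := by rw [pvEnt, if_neg (by omega)]
        by_cases hlt : j < k
        · rw [if_pos hlt, if_pos (by omega)]
        · rw [if_neg hlt]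
          by_cases hlt2 : j < k + (m+1)
          · rw [if_pos hlt2, hz]
          · rw [if_neg hlt2]
      · rw [if_neg hm, if_neg hm]


def pvBlk (B : List (List Int)) (C N ir ic : Nat) : List (List Int) :=
  (List.range N).map (fun i => (List.range N).map (fun j => pvEnt B C (ir * N + i) (ic * N + j)))


lemma pvAPart_eq (B : List (List Int)) (C N irN icN : Nat) :
    pvAPart B (B.length : Int) (C : Int) (N : Int) (irN : Int) (icN : Int)
      = pvBlk B C N irN icN := by
  unfold pvAPart
  rw [PySem.List.pyRange_zero_natCast, List.foldl_map]
  simp only [List.map_map, Function.comp_def]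
  have main : ∀ k, k ≤ N →
      (List.range k).foldl
        (fun part i => pvAJ B (B.length : Int) (C : Int) (irN : Int) (icN : Int) (N : Int) ((i : Nat) : Int)
          ((List.range N).map (fun k => ((k : Nat) : Int))) part)
        ((List.range N).map (fun _ => (List.range N).map (fun _ => (0 : Int))))
      = (List.range N).map (fun i' => if i' < k
          then (List.range N).map (fun j => pvEnt B C (irN * N + i') (icN * N + j))
          else (List.range N).map (fun _ => (0 : Int))) := by
    intro k
    induction k with
    | zero =>
      intro _
      simp only [List.range_zero, List.foldl_nil]
      apply List.map_congr_left
      intro i' _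
      rw [if_neg (by omega)]
    | succ k ih =>
      intro hk
      rw [List.range_succ, List.foldl_append, ih (by omega), List.foldl_cons, List.foldl_nil]
      have hshape : (List.range N).map (fun i' => if i' < k
            then (List.range N).map (fun j => pvEnt B C (irN * N + i') (icN * N + j))
            else (List.range N).map (fun _ => (0 : Int)))
          = (List.range N).map (fun i' => if i' = k
            then (List.range N).map (fun j => if j < 0 then pvEnt B C (irN * N + k) (icN * N + j) else 0)
            else if i' < k
              then (List.range N).map (fun j => pvEnt B C (irN * N + i') (icN * N + j))
              else (List.range N).map (fun _ => (0 : Int))) := by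
        apply List.map_congr_left
        intro i' _
        by_cases he : i' = k
        · rw [if_pos he, if_neg (by omega)]
          apply List.map_congr_left
          intro j _
          rw [if_neg (by omega)]
        · rw [if_neg he]
      rw [hshape, show (List.range N).map (fun k => ((k : Nat) : Int)) = (List.range' 0 N).map (Nat.cast) from by rw [List.range_eq_range'],
        pvAJ_eq B C N irN icN k (by omega) _ N 0 (by omega)]
      apply List.map_congr_left
      intro i' _
      by_cases he : i' = k
      · rw [if_pos he, if_pos (by omega), he]
        apply List.map_congr_left
        intro j hj
        rw [if_pos (by simpa using List.mem_range.mp hj)]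
      · rw [if_neg he]
        by_cases hlt : i' < k
        · rw [if_pos hlt, if_pos (by omega)]
        · rw [if_neg hlt, if_neg (by omega)]
  rw [main N (le_refl N)]
  apply List.map_congr_left
  intro i' hi'
  rw [if_pos (List.mem_range.mp hi')]


lemma pvA_list (B : List (List Int)) (C N nrN ncN : Nat) :
    (PySem.List.pyRange 0 (nrN : Int) 1).foldl
      (fun acc ir => (PySem.List.pyRange 0 (ncN : Int) 1).foldl
        (fun acc ic => acc ++ [pvAPart B (B.length : Int) (C : Int) (N : Int) ir ic]) acc) []
    = (List.range nrN).flatMap (fun ir => (List.range ncN).map (fun ic => pvBlk B C N ir ic)) := by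
  rw [PySem.List.pyRange_zero_natCast, PySem.List.pyRange_zero_natCast, List.foldl_map]
  have hin : ∀ (acc : List (List (List Int))) (ir : Nat),
      ((List.range ncN).map (Nat.cast : Nat → Int)).foldl
        (fun acc ic => acc ++ [pvAPart B (B.length : Int) (C : Int) (N : Int) ((ir : Nat) : Int) ic]) acc
      = acc ++ (List.range ncN).map (fun ic => pvBlk B C N ir ic) := by
    intro acc ir
    rw [PySem.List.foldl_append_singleton_eq_map
      (fun ic => pvAPart B (B.length : Int) (C : Int) (N : Int) ((ir : Nat) : Int) ic)
      ((List.range ncN).map (Nat.cast : Nat → Int)) acc, List.map_map]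
    congr 1
    apply List.map_congr_left
    intro ic _
    exact pvAPart_eq B C N ir ic
  simp only [hin]
  rw [PySem.List.foldl_append_eq_flatMap]
  simp



def pvGrid (M N : Nat) (G : Nat → Nat → Nat → Int) : List (List (List Int)) :=
  (List.range M).map (fun b => (List.range N).map (fun x => (List.range N).map (fun y => G b x y)))


def pvH (B : List (List Int)) (C N ncN i0 j0 : Nat) (b x y : Nat) : Int :=
  if (b / ncN * N + x < i0 ∨ (b / ncN * N + x = i0 ∧ b % ncN * N + y < j0)) ∧ b % ncN * N + y < C
  then pvEnt B C (b / ncN * N + x) (b % ncN * N + y) else 0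


lemma pvGrid_congr {M N : Nat} {G1 G2 : Nat → Nat → Nat → Int}
    (h : ∀ b < M, ∀ x < N, ∀ y < N, G1 b x y = G2 b x y) :
    pvGrid M N G1 = pvGrid M N G2 := by
  unfold pvGrid
  apply List.map_congr_left; intro b hb
  apply List.map_congr_left; intro x hx
  apply List.map_congr_left; intro y hy
  exact h b (List.mem_range.mp hb) x (List.mem_range.mp hx) y (List.mem_range.mp hy)


lemma pv_div_unique {a x b y N : Nat} (hx : x < N) (hy : y < N)
    (h : a * N + x = b * N + y) : a = b ∧ x = y := by
  have hN : 0 < N := by omega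
  have ha : (a * N + x) / N = a := by
    rw [mul_comm, Nat.mul_add_div hN, Nat.div_eq_of_lt hx, Nat.add_zero]
  have hb : (b * N + y) / N = b := by
    rw [mul_comm, Nat.mul_add_div hN, Nat.div_eq_of_lt hy, Nat.add_zero]
  have hab : a = b := by rw [← ha, ← hb, h]
  subst hab
  exact ⟨rfl, by omega⟩


lemma pv_cell (B : List (List Int)) (C N nrN ncN i j : Nat) (hN : 0 < N)
    (hi : i < B.length) (hj : j < C) (hqi : i / N < nrN) (hqj : j / N < ncN)
    (b x y : Nat) (hb : b < nrN * ncN) (hx : x < N) (hy : y < N) :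
    (if (i / N * ncN + j / N) = b ∧ (i % N) = x ∧ (j % N) = y
     then (B.getD i []).getD j 0 else pvH B C N ncN i j b x y)
      = pvH B C N ncN i (j + 1) b x y := by
  have hncN : 0 < ncN := lt_of_le_of_lt (Nat.zero_le _) hqj
  by_cases h : (i / N * ncN + j / N) = b ∧ (i % N) = x ∧ (j % N) = y
  · obtain ⟨hb', hx', hy'⟩ := h
    subst hb' hx' hy'
    have hdiv : (i / N * ncN + j / N) / ncN = i / N := by
      rw [mul_comm, Nat.mul_add_div hncN, Nat.div_eq_of_lt hqj, Nat.add_zero]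
    have hmod : (i / N * ncN + j / N) % ncN = j / N := by
      rw [mul_comm, Nat.mul_add_mod, Nat.mod_eq_of_lt hqj]
    rw [if_pos ⟨rfl, rfl, rfl⟩, pvH, hdiv, hmod]
    have hr : i / N * N + i % N = i := by rw [mul_comm]; exact Nat.div_add_mod i N
    have hc : j / N * N + j % N = j := by rw [mul_comm]; exact Nat.div_add_mod j N
    rw [hr, hc, if_pos (by omega), pvEnt, if_pos ⟨hi, hj⟩]
  · rw [if_neg h]
    have hne : ¬(b / ncN * N + x = i ∧ b % ncN * N + y = j) := by
      intro ⟨hr, hc⟩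
      apply h
      have hr' : b / ncN * N + x = i / N * N + i % N := by
        rw [hr, mul_comm]; rw [Nat.div_add_mod i N]
      have hc' : b % ncN * N + y = j / N * N + j % N := by
        rw [hc, mul_comm]; rw [Nat.div_add_mod j N]
      obtain ⟨hd1, hx1⟩ := pv_div_unique hx (Nat.mod_lt i hN) hr'
      obtain ⟨hd2, hy1⟩ := pv_div_unique hy (Nat.mod_lt j hN) hc'
      refine ⟨?_, hx1.symm, hy1.symm⟩
      rw [← hd1, ← hd2, mul_comm (b / ncN) ncN]
      exact (Nat.div_add_mod b ncN)
    unfold pvH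
    split_ifs with h1 h2 h2 <;> first | rfl | (exfalso; omega)


lemma pv_step_write (B : List (List Int)) (C N nrN ncN i j : Nat) (hN : 0 < N)
    (hi : i < B.length) (hj : j < C)
    (hR : B.length ≤ nrN * N) (hC : C ≤ ncN * N) :
    ((pvGrid (nrN * ncN) N (pvH B C N ncN i j)).modify (i / N * ncN + j / N)
      (fun blk => blk.modify (i % N)
        (fun r => r.modify (j % N) (fun _ => (B.getD i []).getD j 0))))
    = pvGrid (nrN * ncN) N (pvH B C N ncN i (j + 1)) := by
  have hqi : i / N < nrN := (Nat.div_lt_iff_lt_mul hN).mpr (by omega)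
  have hqj : j / N < ncN := (Nat.div_lt_iff_lt_mul hN).mpr (by omega)
  have hncN : 0 < ncN := lt_of_le_of_lt (Nat.zero_le _) hqj
  have hw : i / N * ncN + j / N < nrN * ncN := by
    have h1 : i / N * ncN + j / N < (i / N + 1) * ncN := by
      rw [Nat.add_mul, Nat.one_mul]; omega
    have h2 : (i / N + 1) * ncN ≤ nrN * ncN := Nat.mul_le_mul_right ncN hqi
    omega
  apply List.ext_getElem
  · simp [pvGrid]
  · intro b hb1 hb2
    have hbM : b < nrN * ncN := by simpa [pvGrid] using hb2
    simp only [pvGrid, List.getElem_modify, List.getElem_map, List.getElem_range]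
    by_cases hbw : i / N * ncN + j / N = b
    · rw [if_pos hbw]
      apply List.ext_getElem
      · simp
      · intro x hx1 hx2
        have hxN : x < N := by simpa using hx2
        simp only [List.getElem_modify, List.getElem_map, List.getElem_range]
        by_cases hxr : i % N = x
        · rw [if_pos hxr]
          apply List.ext_getElem
          · simp
          · intro y hy1 hy2
            have hyN : y < N := by simpa using hy2
            simp only [List.getElem_modify, List.getElem_map, List.getElem_range]
            by_cases hyr : j % N = y
            · rw [if_pos hyr]
              have := pv_cell B C N nrN ncN i j hN hi hj hqi hqj b x y hbM hxN hyN
              rw [if_pos ⟨hbw, hxr, hyr⟩] at this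
              exact this
            · rw [if_neg hyr]
              have := pv_cell B C N nrN ncN i j hN hi hj hqi hqj b x y hbM hxN hyN
              rw [if_neg (by intro h; exact hyr h.2.2)] at this
              exact this
        · rw [if_neg hxr]
          apply List.ext_getElem
          · simp
          · intro y hy1 hy2
            have hyN : y < N := by simpa using hy2
            simp only [List.getElem_map, List.getElem_range]
            have := pv_cell B C N nrN ncN i j hN hi hj hqi hqj b x y hbM hxN hyN
            rw [if_neg (by intro h; exact hxr h.2.1)] at this
            exact this
    · rw [if_neg hbw]
      apply List.ext_getElem
      · simp
      · intro x hx1 hx2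
        have hxN : x < N := by simpa using hx2
        simp only [List.getElem_map, List.getElem_range]
        apply List.ext_getElem
        · simp
        · intro y hy1 hy2
          have hyN : y < N := by simpa using hy2
          simp only [List.getElem_map, List.getElem_range]
          have := pv_cell B C N nrN ncN i j hN hi hj hqi hqj b x y hbM hxN hyN
          rw [if_neg (by intro h; exact hbw h.1)] at this
          exact this


lemma pvH_row_end (B : List (List Int)) (C N ncN M i : Nat) :
    pvGrid M N (pvH B C N ncN i C) = pvGrid M N (pvH B C N ncN (i + 1) 0) := by
  apply pvGrid_congr
  intro b _ x _ y _
  unfold pvH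
  have hiff : (b / ncN * N + x < i ∨ (b / ncN * N + x = i ∧ b % ncN * N + y < C)) ∧ b % ncN * N + y < C
      ↔ (b / ncN * N + x < i + 1 ∨ (b / ncN * N + x = i + 1 ∧ b % ncN * N + y < 0)) ∧ b % ncN * N + y < C := by
    omega
  rw [if_congr hiff rfl rfl]


lemma pvB_row (B : List (List Int)) (C N nrN ncN iN : Nat) (hN : 0 < N)
    (hi : iN < B.length) (hR : B.length ≤ nrN * N) (hC : C ≤ ncN * N) :
    ∀ m, m ≤ C →
    (List.range m).foldl
      (fun bl jN =>
        bl.modify (PySem.Int.floordiv (iN : Int) (N : Int) * (ncN : Int)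
            + PySem.Int.floordiv ((jN : Nat) : Int) (N : Int)).toNat
          (fun blk => blk.modify (PySem.Int.mod (iN : Int) (N : Int)).toNat
            (fun r => r.modify (PySem.Int.mod ((jN : Nat) : Int) (N : Int)).toNat
              (fun _ => PySem.List.pyGetD (PySem.List.pyGetD B (iN : Int) []) ((jN : Nat) : Int) 0))))
      (pvGrid (nrN * ncN) N (pvH B C N ncN iN 0))
    = pvGrid (nrN * ncN) N (pvH B C N ncN iN m) := by
  intro m
  induction m with
  | zero => intro _; simp
  | succ m ih =>
    intro hm
    rw [List.range_succ, List.foldl_append, ih (by omega), List.foldl_cons, List.foldl_nil]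
    rw [PySem.Int.floordiv_natCast, PySem.Int.floordiv_natCast, PySem.Int.mod_natCast,
      PySem.Int.mod_natCast, PySem.List.pyGetD_natCast, PySem.List.pyGetD_natCast]
    rw [show ((iN / N : Nat) : Int) * ((ncN : Nat) : Int) + ((m / N : Nat) : Int)
        = ((iN / N * ncN + m / N : Nat) : Int) from by push_cast; ring]
    rw [Int.toNat_natCast, Int.toNat_natCast, Int.toNat_natCast]
    exact pv_step_write B C N nrN ncN iN m hN hi (by omega) hR hC


lemma pvB_scatter (B : List (List Int)) (C N nrN ncN : Nat) (hN : 0 < N)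
    (hR : B.length ≤ nrN * N) (hC : C ≤ ncN * N) :
    (PySem.List.pyRange 0 (B.length : Int) 1).foldl
      (fun bl i =>
        (PySem.List.pyRange 0 (C : Int) 1).foldl
          (fun bl j =>
            bl.modify (PySem.Int.floordiv i (N : Int) * (ncN : Int) + PySem.Int.floordiv j (N : Int)).toNat
              (fun blk => blk.modify (PySem.Int.mod i (N : Int)).toNat
                (fun r => r.modify (PySem.Int.mod j (N : Int)).toNat
                  (fun _ => PySem.List.pyGetD (PySem.List.pyGetD B i []) j 0)))) bl)
      (pvGrid (nrN * ncN) N (pvH B C N ncN 0 0))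
    = pvGrid (nrN * ncN) N (pvH B C N ncN B.length 0) := by
  rw [PySem.List.pyRange_zero_natCast B.length, List.foldl_map]
  have main : ∀ k, k ≤ B.length →
      (List.range k).foldl
        (fun bl iN =>
          (PySem.List.pyRange 0 (C : Int) 1).foldl
            (fun bl j =>
              bl.modify (PySem.Int.floordiv ((iN : Nat) : Int) (N : Int) * (ncN : Int) + PySem.Int.floordiv j (N : Int)).toNat
                (fun blk => blk.modify (PySem.Int.mod ((iN : Nat) : Int) (N : Int)).toNat
                  (fun r => r.modify (PySem.Int.mod j (N : Int)).toNat
                    (fun _ => PySem.List.pyGetD (PySem.List.pyGetD B ((iN : Nat) : Int) []) j 0)))) bl)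
        (pvGrid (nrN * ncN) N (pvH B C N ncN 0 0))
      = pvGrid (nrN * ncN) N (pvH B C N ncN k 0) := by
    intro k
    induction k with
    | zero => intro _; simp
    | succ k ih =>
      intro hk
      rw [List.range_succ, List.foldl_append, ih (by omega), List.foldl_cons, List.foldl_nil]
      rw [PySem.List.pyRange_zero_natCast, List.foldl_map]
      rw [pvB_row B C N nrN ncN k hN (by omega) hR hC C (le_refl C)]
      exact pvH_row_end B C N ncN (nrN * ncN) k
  exact main B.length (le_refl _)


lemma pv_flatMap_prod {α : Type} (a b : Nat) (h : Nat → Nat → α) :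
    (List.range a).flatMap (fun ir => (List.range b).map (fun ic => h ir ic))
      = (List.range (a * b)).map (fun k => h (k / b) (k % b)) := by
  induction a with
  | zero => simp
  | succ a ih =>
    rw [List.range_succ, List.flatMap_append, ih, Nat.succ_mul, List.range_add, List.map_append]
    congr 1
    simp only [List.flatMap_singleton, List.map_map]
    apply List.map_congr_left
    intro ic hic
    have hic' : ic < b := List.mem_range.mp hic
    have hb : 0 < b := by omega
    simp only [Function.comp]
    rw [mul_comm a b, Nat.mul_add_div hb, Nat.mul_add_mod, Nat.div_eq_of_lt hic',
      Nat.mod_eq_of_lt hic', Nat.add_zero]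

lemma pv_blocks0 (B : List (List Int)) (C N ncN M : Nat) :
    (List.range M).map (fun _ => (List.range N).map (fun _ => List.replicate N (0 : Int)))
      = pvGrid M N (pvH B C N ncN 0 0) := by
  unfold pvGrid
  apply List.map_congr_left
  intro b _
  apply List.map_congr_left
  intro x _
  have : (List.range N).map (fun y => pvH B C N ncN 0 0 b x y)
      = (List.range N).map (fun _ => (0 : Int)) := by
    apply List.map_congr_left
    intro y _
    unfold pvH
    rw [if_neg (by omega)]
  rw [this, List.map_const', List.length_range]

lemma pv_final_grid (B : List (List Int)) (C N nrN ncN : Nat) :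
    pvGrid (nrN * ncN) N (pvH B C N ncN B.length 0)
      = (List.range (nrN * ncN)).map (fun k => pvBlk B C N (k / ncN) (k % ncN)) := by
  unfold pvGrid pvBlk
  apply List.map_congr_left
  intro b _
  apply List.map_congr_left
  intro x _
  apply List.map_congr_left
  intro y _
  unfold pvH pvEnt
  split_ifs with h1 h2 h2 <;> first | rfl | omega

-- ===== VERDICT (by name: the statement is the Claim_ definition above) =====
theorem Matrix_slicer_spec : Claim_equal_Matrix_slicer := by
  intro B n _ hpre
  obtain ⟨hn, hBne, hrows⟩ := hpre
  obtain ⟨N, rfl⟩ : ∃ N : Nat, n = (N : Int) := ⟨n.toNat, by omega⟩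
  have hN : 0 < N := by exact_mod_cast hn
  unfold Spec_Matrix_slicer
  simp only [Matrix_slicer, Matrix_slicer_alt]
  have h0 : PySem.List.pyGetD B 0 [] = B.getD 0 [] := by
    rw [show (0 : Int) = ((0 : Nat) : Int) from rfl, PySem.List.pyGetD_natCast]
  rw [h0]
  set R := B.length with hR
  set C := (B.getD 0 []).length with hC
  set nrN := pvCeil R N with hnr
  set ncN := pvCeil C N with hnc
  rw [pv_nrA R N hN, pv_nrA C N hN, pv_nrB R N hN, pv_nrB C N hN]
  have hRle : R ≤ nrN * N := (pvCeil_bracket hN).1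
  have hCle : C ≤ ncN * N := (pvCeil_bracket hN).1
  have hmulcast : ((nrN : Int)) * ((ncN : Int)) = ((nrN * ncN : Nat) : Int) := by push_cast; ring
  rw [hmulcast]
  have hNtoNat : ((N : Int)).toNat = N := Int.toNat_natCast N
  rw [hNtoNat]
  have hblocks0 : (PySem.List.pyRange 0 ((nrN * ncN : Nat) : Int) 1).map
        (fun _ => (PySem.List.pyRange 0 (N : Int) 1).map (fun _ => List.replicate N (0 : Int)))
      = pvGrid (nrN * ncN) N (pvH B C N ncN 0 0) := by
    rw [PySem.List.pyRange_zero_natCast, PySem.List.pyRange_zero_natCast, List.map_map, List.map_map]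
    have := pv_blocks0 B C N ncN (nrN * ncN)
    simpa [Function.comp_def] using this
  rw [hblocks0]
  rw [pvB_scatter B C N nrN ncN hN hRle hCle]
  rw [pvA_list B C N nrN ncN]
  rw [pv_flatMap_prod, pv_final_grid]
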